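-- pv_equiv track=rewrite | github.com/BenWolfaardt/slip-39-passphrase-brute-force | main.py | parse_mnemonic_shares
-- ===== SOURCE A (Python) =====
-- from typing import List, Iterator, Optional, Union, cast
--
-- def parse_mnemonic_shares(mnemonic: str) -> List[str]:
--     """
--     Parse a single mnemonic string into individual SLIP-39 shares.
--
--     SLIP-39 shares are typically separated by newlines or multiple spaces.
--     Each share is a sequence of words.
--
--     Args:
--         mnemonic: Single string containing one or more SLIP-39 shares
--
--     Returns:
--         List of individual mnemonic share strings
--     """
--     if not mnemonic:
--         return []
--
--     # Split by newlines first, then by multiple spaces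
--     lines = mnemonic.strip().split('\n')
--     shares = []
--
--     for line in lines:
--         line = line.strip()
--         if line:
--             # Check if this line contains multiple shares separated by multiple spaces
--             # A typical SLIP-39 share has 20 or 33 words
--             words = line.split()
--             if len(words) >= 40:  # Likely multiple shares in one line
--                 # Try to split into chunks of ~20-33 words
--                 share_words = []
--                 for i, word in enumerate(words):
--                     share_words.append(word)
--                     # Check if we have a complete share (typically 20 or 33 words)
--                     if len(share_words) in [20, 33] or i == len(words) - 1:
--                         if share_words:
--                             shares.append(' '.join(share_words))
--                             share_words = []
--             else:
--                 # Single share per line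
--                 shares.append(line)
--
--     return shares
-- ===== SOURCE B (Python) =====
-- def parse_mnemonic_shares(mnemonic):
--     shares = []
--     for raw in (mnemonic or "").strip().split('\n'):
--         line = raw.strip()
--         if not line:
--             continue
--         words = line.split()
--         if len(words) < 40:
--             shares.append(line)
--         else:
--             while words:
--                 shares.append(' '.join(words[:20]))
--                 words = words[20:]
--     return shares
-- ===== Notes on version B (the rewrite author's own statement) =====
-- stated objective: simpler
-- what changed: A's enumerate-and-accumulator chunking loop (with its dead 33-word flush condition and last-index bookkeeping) is replaced by direct slicing of the word list into 20-word chunks with a while loop over words[:20]/words[20:].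
import Mathlib
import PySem

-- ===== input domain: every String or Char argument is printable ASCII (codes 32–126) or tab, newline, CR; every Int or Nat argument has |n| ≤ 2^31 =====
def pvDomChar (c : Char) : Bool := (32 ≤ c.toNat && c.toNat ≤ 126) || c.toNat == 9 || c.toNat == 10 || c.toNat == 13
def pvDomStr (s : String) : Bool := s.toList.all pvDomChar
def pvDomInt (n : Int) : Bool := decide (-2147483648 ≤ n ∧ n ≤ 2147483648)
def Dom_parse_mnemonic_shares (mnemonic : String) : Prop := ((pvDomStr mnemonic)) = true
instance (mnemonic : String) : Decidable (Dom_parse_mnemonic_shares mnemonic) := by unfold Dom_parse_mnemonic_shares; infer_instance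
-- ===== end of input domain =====

-- B replaces A's enumerate/accumulator chunking loop (whose 33-word case is dead code,
-- since the 20-word flush always fires first) by direct slicing into 20-word chunks: simpler.

-- ===== PORT A =====
-- the inner 'for i, word in enumerate(words)' accumulator loop of A; n = len(words)
def chunkLoopA (n : Int) : List (Int × String) → List String → List String → List String
  | [], _sw, shares => shares
  | (i, w) :: rest, sw, shares =>
    let sw := sw ++ [w]
    if sw.length = 20 ∨ sw.length = 33 ∨ i = n - 1 then
      -- 'if share_words: shares.append(' '.join(share_words))'
      chunkLoopA n rest [] (shares ++ if sw = [] then [] else [PySem.Str.join " " sw])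
    else
      chunkLoopA n rest sw shares

def parse_mnemonic_shares (mnemonic : String) : List String :=
  if mnemonic = "" then []
  else
    -- sep is the literal "\n" ≠ "", so split? is always 'some'
    let lines := (PySem.Str.split? (PySem.Str.strip mnemonic) "\n").getD []
    lines.foldl (fun shares line =>
      let line := PySem.Str.strip line
      if line ≠ "" then
        let words := PySem.Str.split₀ line
        if words.length ≥ 40 then
          chunkLoopA (words.length : Int) (PySem.List.enumerate words) [] shares
        else
          shares ++ [line]
      else shares) []

-- ===== PORT B =====
-- Source B's 'while words: shares.append(' '.join(words[:20])); words = words[20:]'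
def chunkWhileB (shares : List String) (words : List String) : List String :=
  if h : words = [] then shares
  else chunkWhileB (shares ++ [PySem.Str.join " " (words.take 20)]) (words.drop 20)
termination_by words.length
decreasing_by
  have := List.length_pos_iff.mpr h
  simp only [List.length_drop]
  omega

def parse_mnemonic_shares_alt (mnemonic : String) : List String :=
  let m := if mnemonic = "" then "" else mnemonic   -- '(mnemonic or "")'
  -- sep is the literal "\n" ≠ "", so split? is always 'some'
  ((PySem.Str.split? (PySem.Str.strip m) "\n").getD []).foldl (fun shares raw =>
    let line := PySem.Str.strip raw
    if line = "" then shares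
    else
      let words := PySem.Str.split₀ line
      if words.length < 40 then shares ++ [line]
      else chunkWhileB shares words) []

-- ===== PRECONDITION & SPEC =====
def Spec_parse_mnemonic_shares (mnemonic : String) (out : List String) : Prop := out = parse_mnemonic_shares_alt mnemonic
instance (mnemonic : String) (out : List String) : Decidable (Spec_parse_mnemonic_shares mnemonic out) := by unfold Spec_parse_mnemonic_shares; infer_instance

-- ===== CLAIM (what is proved, stated in full; the proofs are below) =====
def Claim_equal_parse_mnemonic_shares : Prop := ∀ (mnemonic : String), Dom_parse_mnemonic_shares mnemonic → Spec_parse_mnemonic_shares mnemonic (parse_mnemonic_shares mnemonic)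

-- ===== LEMMAS AND PROOFS =====

lemma chunkWhileB_nil (shares : List String) : chunkWhileB shares [] = shares := by
  rw [chunkWhileB]; simp

lemma chunkWhileB_ne_nil (shares words : List String) (h : words ≠ []) :
    chunkWhileB shares words
      = chunkWhileB (shares ++ [PySem.Str.join " " (words.take 20)]) (words.drop 20) := by
  rw [chunkWhileB]; simp [h]

-- A's accumulator loop equals B's slicing loop, for any start index k of enumerate,
-- any pending chunk sw of fewer than 20 words, and any shares accumulated so far.
lemma chunkLoopA_eq_chunkWhileB (words : List String) :
    ∀ (k : Int) (sw shares : List String), words ≠ [] → sw.length < 20 →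
      chunkLoopA (k + words.length) (PySem.List.enumerate words k) sw shares
        = chunkWhileB shares (sw ++ words) := by
  induction words with
  | nil => intro _ _ _ h; exact absurd rfl h
  | cons w rest ih =>
    intro k sw shares _ hsw
    rw [PySem.List.enumerate_cons, chunkLoopA]
    rcases List.eq_nil_or_concat' rest with hrest | _
    · -- last word: the 'i == len(words) - 1' flush fires
      subst hrest
      have hcond : ((sw ++ [w]).length = 20 ∨ (sw ++ [w]).length = 33 ∨ k = k + ([w] : List String).length - 1) := by
        right; right; simp
      rw [if_pos hcond]
      have hne : sw ++ [w] ≠ [] := by simp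
      rw [if_neg hne, PySem.List.enumerate_nil, chunkLoopA]
      have hle : (sw ++ [w]).length ≤ 20 := by simp; omega
      rw [chunkWhileB_ne_nil _ _ hne, List.take_of_length_le hle,
        List.drop_eq_nil_of_le hle, chunkWhileB_nil]
    · have hrest : rest ≠ [] := by rintro rfl; simp_all
      by_cases h20 : (sw ++ [w]).length = 20
      · -- 20-word flush, restart with an empty pending chunk
        rw [if_pos (Or.inl h20)]
        have hne : sw ++ [w] ≠ [] := by simp
        rw [if_neg hne]
        have hn : k + ((w :: rest).length : Int) = (k + 1) + (rest.length : Int) := by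
          simp; omega
        rw [hn, ih (k + 1) [] _ hrest (by simp), List.nil_append]
        have hx : sw ++ w :: rest = (sw ++ [w]) ++ rest := by simp
        conv_rhs => rw [hx, chunkWhileB_ne_nil _ _ (show (sw ++ [w]) ++ rest ≠ [] by simp)]
        rw [List.take_left' h20, List.drop_left' h20]
      · -- no flush: keep accumulating
        have hlt : (sw ++ [w]).length < 20 := by
          have : (sw ++ [w]).length ≤ 20 := by simp; omega
          omega
        have hcond : ¬ ((sw ++ [w]).length = 20 ∨ (sw ++ [w]).length = 33 ∨ k = k + ((w :: rest).length : Int) - 1) := by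
          push Not
          refine ⟨h20, by omega, ?_⟩
          have h1 : 1 ≤ rest.length := Nat.one_le_iff_ne_zero.mpr (by simpa using hrest)
          have : ((w :: rest).length : Int) = (rest.length : Int) + 1 := by simp
          omega
        rw [if_neg hcond]
        have hn : k + ((w :: rest).length : Int) = (k + 1) + (rest.length : Int) := by
          simp; omega
        rw [hn, ih (k + 1) (sw ++ [w]) shares hrest hlt]
        simp

-- the per-line step functions of the two outer folds agree
lemma fold_step_eq (shares : List String) (line : String) :
    (fun shares line =>
      let line := PySem.Str.strip line
      if line ≠ "" then
        let words := PySem.Str.split₀ line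
        if words.length ≥ 40 then
          chunkLoopA (words.length : Int) (PySem.List.enumerate words) [] shares
        else shares ++ [line]
      else shares) shares line
    = (fun shares raw =>
      let line := PySem.Str.strip raw
      if line = "" then shares
      else
        let words := PySem.Str.split₀ line
        if words.length < 40 then shares ++ [line]
        else chunkWhileB shares words) shares line := by
  simp only
  by_cases hl : PySem.Str.strip line = ""
  · simp [hl]
  · rw [if_pos hl, if_neg hl]
    by_cases h40 : (PySem.Str.split₀ (PySem.Str.strip line)).length ≥ 40
    · rw [if_pos h40, if_neg (by omega)]
      have hne : PySem.Str.split₀ (PySem.Str.strip line) ≠ [] := by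
        intro h; rw [h] at h40; simp at h40
      have h := chunkLoopA_eq_chunkWhileB (PySem.Str.split₀ (PySem.Str.strip line))
        0 [] shares hne (by simp)
      rw [zero_add, List.nil_append] at h
      exact h
    · rw [if_neg h40, if_pos (by omega)]

-- ===== VERDICT (by name: the statement is the Claim_ definition above) =====
theorem parse_mnemonic_shares_spec : Claim_equal_parse_mnemonic_shares := by
  intro mnemonic _
  unfold Spec_parse_mnemonic_shares parse_mnemonic_shares parse_mnemonic_shares_alt
  by_cases hm : mnemonic = ""
  · subst hm
    rw [if_pos rfl]
    rfl
  · rw [if_neg hm]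
    simp only [if_neg hm]
    exact List.foldl_ext _ _ _ (fun a b _ => fold_step_eq a b)
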